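-- pv_equiv track=rewrite | github.com/GZ-Li/Synchronize_TLs | synchronize_TL_net.py | generate_phases
-- ===== SOURCE A (Python) =====
-- def generate_phases(inclanes_times):
--     state_1 = ""
--     state_2 = ""
--     state_3 = ""
--     state_4 = ""
--     state_flag = 1
--     for inclane_id, times in inclanes_times.items():
--         if state_flag % 2 == 1:
--             state_1 += 'r' * times
--         else:
--             state_1 += 'g' * times
--         state_flag += 1
--     state_flag = 1
--     for inclane_id, times in inclanes_times.items():
--         if state_flag % 2 == 1:
--             state_2 += 'r' * times
--         else:
--             state_2 += 'y' * times
--         state_flag += 1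
--     state_flag = 1
--     for inclane_id, times in inclanes_times.items():
--         if state_flag % 2 == 1:
--             state_3 += 'g' * times
--         else:
--             state_3 += 'r' * times
--         state_flag += 1
--     state_flag = 1
--     for inclane_id, times in inclanes_times.items():
--         if state_flag % 2 == 1:
--             state_4 += 'y' * times
--         else:
--             state_4 += 'r' * times
--         state_flag += 1
--     phases = [
--     {'duration': '40', 'state': state_1},
--     {'duration': '5',  'state': state_2},
--     {'duration': '40', 'state': state_3},
--     {'duration': '5',  'state': state_4}
--     ]
--     return phases
-- ===== SOURCE B (Python) =====
-- def generate_phases(inclanes_times):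
--     runs_1, runs_2, runs_3, runs_4 = [], [], [], []
--     for i, (inclane_id, times) in enumerate(inclanes_times.items(), 1):
--         if i % 2 == 1:
--             a, b, c, d = 'r', 'r', 'g', 'y'
--         else:
--             a, b, c, d = 'g', 'y', 'r', 'r'
--         runs_1.append(a * times)
--         runs_2.append(b * times)
--         runs_3.append(c * times)
--         runs_4.append(d * times)
--     return [
--         {'duration': '40', 'state': ''.join(runs_1)},
--         {'duration': '5',  'state': ''.join(runs_2)},
--         {'duration': '40', 'state': ''.join(runs_3)},
--         {'duration': '5',  'state': ''.join(runs_4)},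
--     ]
-- ===== Notes on version B (the rewrite author's own statement) =====
-- stated objective: simpler
-- what changed: Replaces A's four sequential loops over the dict (each rebuilding its own parity flag and growing a string by +=) with a single enumerate pass that maintains four lists of character runs, joined once at the end.
import Mathlib
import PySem

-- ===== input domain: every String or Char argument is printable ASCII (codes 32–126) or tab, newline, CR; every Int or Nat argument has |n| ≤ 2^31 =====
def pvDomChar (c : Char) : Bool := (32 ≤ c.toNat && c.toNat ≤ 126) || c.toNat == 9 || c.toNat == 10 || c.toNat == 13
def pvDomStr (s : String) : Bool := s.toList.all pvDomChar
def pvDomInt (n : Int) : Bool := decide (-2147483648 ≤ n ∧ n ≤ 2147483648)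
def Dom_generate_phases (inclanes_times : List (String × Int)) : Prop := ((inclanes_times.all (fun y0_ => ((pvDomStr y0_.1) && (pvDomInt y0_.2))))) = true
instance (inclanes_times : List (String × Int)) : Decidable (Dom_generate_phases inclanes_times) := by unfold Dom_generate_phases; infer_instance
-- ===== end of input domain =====

-- B builds the four state strings in one enumerate pass over the dict items (four run lists,
-- joined at the end) instead of A's four separate flag-counting loops; return value proved equal.

-- ===== PORT A =====
-- A iterates four times over inclanes_times.items() with a 1-based parity flag, growing each
-- state string by 'c' * times ('' for times ≤ 0); strings are ported as List Char, wrapped with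
-- String.ofList at the end. The dict argument is the association list normalised by Dict.ofList.
def generate_phases (inclanes_times : List (String × Int)) : List (List (String × String)) :=
  let items := (PySem.Dict.ofList inclanes_times).items
  let state_1 := (items.foldl (fun (st : List Char × Int) p =>
      (if PySem.Int.mod st.2 2 = 1 then st.1 ++ List.replicate p.2.toNat 'r'
       else st.1 ++ List.replicate p.2.toNat 'g', st.2 + 1)) ([], 1)).1
  let state_2 := (items.foldl (fun (st : List Char × Int) p =>
      (if PySem.Int.mod st.2 2 = 1 then st.1 ++ List.replicate p.2.toNat 'r'
       else st.1 ++ List.replicate p.2.toNat 'y', st.2 + 1)) ([], 1)).1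
  let state_3 := (items.foldl (fun (st : List Char × Int) p =>
      (if PySem.Int.mod st.2 2 = 1 then st.1 ++ List.replicate p.2.toNat 'g'
       else st.1 ++ List.replicate p.2.toNat 'r', st.2 + 1)) ([], 1)).1
  let state_4 := (items.foldl (fun (st : List Char × Int) p =>
      (if PySem.Int.mod st.2 2 = 1 then st.1 ++ List.replicate p.2.toNat 'y'
       else st.1 ++ List.replicate p.2.toNat 'r', st.2 + 1)) ([], 1)).1
  [[("duration", "40"), ("state", String.ofList state_1)],
   [("duration", "5"),  ("state", String.ofList state_2)],
   [("duration", "40"), ("state", String.ofList state_3)],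
   [("duration", "5"),  ("state", String.ofList state_4)]]

-- ===== PORT B =====
-- one pass over enumerate(items, 1): four run-list accumulators, joined (flattened) at the end
def generate_phases_alt (inclanes_times : List (String × Int)) : List (List (String × String)) :=
  let items := (PySem.Dict.ofList inclanes_times).items
  let runs := (PySem.List.enumerate items 1).foldl
    (fun (r : List (List Char) × List (List Char) × List (List Char) × List (List Char)) ip =>
      let abcd := if PySem.Int.mod ip.1 2 = 1 then ('r', 'r', 'g', 'y') else ('g', 'y', 'r', 'r')
      (r.1 ++ [List.replicate ip.2.2.toNat abcd.1],
       r.2.1 ++ [List.replicate ip.2.2.toNat abcd.2.1],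
       r.2.2.1 ++ [List.replicate ip.2.2.toNat abcd.2.2.1],
       r.2.2.2 ++ [List.replicate ip.2.2.toNat abcd.2.2.2]))
    ([], [], [], [])
  [[("duration", "40"), ("state", String.ofList runs.1.flatten)],
   [("duration", "5"),  ("state", String.ofList runs.2.1.flatten)],
   [("duration", "40"), ("state", String.ofList runs.2.2.1.flatten)],
   [("duration", "5"),  ("state", String.ofList runs.2.2.2.flatten)]]

-- ===== PRECONDITION & SPEC =====
def Spec_generate_phases (inclanes_times : List (String × Int)) (out : List (List (String × String))) : Prop := out = generate_phases_alt inclanes_times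
instance (inclanes_times : List (String × Int)) (out : List (List (String × String))) : Decidable (Spec_generate_phases inclanes_times out) := by unfold Spec_generate_phases; infer_instance

-- ===== CLAIM (what is proved, stated in full; the proofs are below) =====
def Claim_equal_generate_phases : Prop := ∀ (inclanes_times : List (String × Int)), Dom_generate_phases inclanes_times → Spec_generate_phases inclanes_times (generate_phases inclanes_times)

-- ===== LEMMAS AND PROOFS =====

-- A's flag-counting fold appends, for each item in turn, the parity-chosen run.
theorem gp_foldA (oddC evenC : Char) (l : List (String × Int)) (acc : List Char) (k : Int) :
    (l.foldl (fun (st : List Char × Int) p =>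
      (if PySem.Int.mod st.2 2 = 1 then st.1 ++ List.replicate p.2.toNat oddC
       else st.1 ++ List.replicate p.2.toNat evenC, st.2 + 1)) (acc, k)).1
    = acc ++ (PySem.List.enumerate l k).flatMap (fun ip =>
        if PySem.Int.mod ip.1 2 = 1 then List.replicate ip.2.2.toNat oddC
        else List.replicate ip.2.2.toNat evenC) := by
  induction l generalizing acc k with
  | nil => simp [PySem.List.enumerate]
  | cons x xs ih =>
      rw [PySem.List.enumerate_cons]
      simp only [List.foldl_cons, List.flatMap_cons]
      by_cases h : PySem.Int.mod k 2 = 1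
      · simp only [if_pos h]; rw [ih]; simp
      · simp only [if_neg h]; rw [ih]; simp

-- B's single fold produces, channel by channel, the list of parity-chosen runs.
theorem gp_foldB (e : List (Int × (String × Int)))
    (r1 r2 r3 r4 : List (List Char)) :
    (e.foldl (fun (r : List (List Char) × List (List Char) × List (List Char) × List (List Char)) ip =>
      let abcd := if PySem.Int.mod ip.1 2 = 1 then ('r', 'r', 'g', 'y') else ('g', 'y', 'r', 'r')
      (r.1 ++ [List.replicate ip.2.2.toNat abcd.1],
       r.2.1 ++ [List.replicate ip.2.2.toNat abcd.2.1],
       r.2.2.1 ++ [List.replicate ip.2.2.toNat abcd.2.2.1],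
       r.2.2.2 ++ [List.replicate ip.2.2.toNat abcd.2.2.2])) (r1, r2, r3, r4))
    = (r1 ++ e.map (fun ip => if PySem.Int.mod ip.1 2 = 1 then List.replicate ip.2.2.toNat 'r' else List.replicate ip.2.2.toNat 'g'),
       r2 ++ e.map (fun ip => if PySem.Int.mod ip.1 2 = 1 then List.replicate ip.2.2.toNat 'r' else List.replicate ip.2.2.toNat 'y'),
       r3 ++ e.map (fun ip => if PySem.Int.mod ip.1 2 = 1 then List.replicate ip.2.2.toNat 'g' else List.replicate ip.2.2.toNat 'r'),
       r4 ++ e.map (fun ip => if PySem.Int.mod ip.1 2 = 1 then List.replicate ip.2.2.toNat 'y' else List.replicate ip.2.2.toNat 'r')) := by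
  induction e generalizing r1 r2 r3 r4 with
  | nil => simp
  | cons x xs ih =>
      simp only [List.foldl_cons, List.map_cons]
      by_cases h : PySem.Int.mod x.1 2 = 1
      · simp only [if_pos h]; rw [ih]; simp
      · simp only [if_neg h]; rw [ih]; simp

-- ===== VERDICT (by name: the statement is the Claim_ definition above) =====
theorem generate_phases_spec : Claim_equal_generate_phases := by
  intro l _
  show generate_phases l = generate_phases_alt l
  unfold generate_phases generate_phases_alt
  simp only [gp_foldA, gp_foldB]
  simp [List.flatMap_def]
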